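-- pv_equiv track=rewrite | github.com/calmcoconut/dpv-exercises | dp/6.2 hotels.py | hotels2
-- ===== SOURCE A (Python) =====
-- def hotels2(lst):
-- 	n = len(lst)
-- 	opt = [float("inf")] * (n+1)
-- 	opt[0] = 0
-- 	lst.insert(0,0)
--
-- 	for i in range(1,n+1):
-- 		for j in range(i):
-- 			diff = (200-(lst[i] - lst[j]))**2 + opt[j]
-- 			opt[i] = min(opt[i], diff)
-- 	return opt[n] , []
-- ===== SOURCE B (Python) =====
-- def hotels2(lst):
--     # Backward (cost-to-go) DP: togo[j] = min penalty to travel from stop j to the last stop.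
--     stops = [0] + lst
--     n = len(lst)
--     togo = [0] * (n + 1)
--     for j in reversed(range(n)):
--         togo[j] = min((200 - (stops[i] - stops[j])) ** 2 + togo[i] for i in range(j + 1, n + 1))
--     return togo[0], []
-- ===== Notes on version B (the rewrite author's own statement) =====
-- stated objective: alternative
-- what changed: Replaces A's forward cost-so-far DP (infinity-initialised table filled left-to-right with running-min updates, after an in-place insert into the argument) by a right-to-left cost-to-go DP over suffixes; equality is proved by an exchange argument showing the two optima over stop subsets coincide.
import Mathlib
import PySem

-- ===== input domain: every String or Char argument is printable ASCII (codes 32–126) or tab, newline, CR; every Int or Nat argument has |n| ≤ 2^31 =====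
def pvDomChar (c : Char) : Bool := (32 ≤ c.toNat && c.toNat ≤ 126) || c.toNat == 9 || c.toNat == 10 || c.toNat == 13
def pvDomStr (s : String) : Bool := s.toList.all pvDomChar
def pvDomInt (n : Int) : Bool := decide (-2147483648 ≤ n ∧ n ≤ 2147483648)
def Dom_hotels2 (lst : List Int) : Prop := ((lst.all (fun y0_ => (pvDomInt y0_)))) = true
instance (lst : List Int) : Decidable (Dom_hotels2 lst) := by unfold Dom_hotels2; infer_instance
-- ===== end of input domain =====

-- B replaces A's forward cost-so-far DP (sentinel-initialised table, nested index loops) by a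
-- right-to-left cost-to-go DP over suffixes; same O(n^2) cost ("alternative").  Python A mutates
-- its argument (lst.insert(0,0)); B does not — the equivalence proved here is about the RETURN value.

-- ===== PORT A =====
-- Python's float("inf") table entries are modelled as `none` (they are only compared with min and
-- overwritten; an inf entry is never returned: opt[n] is finite for every input, so the final
-- `.getD 0` fallback is never taken).
def optMin : Option Int → Option Int → Option Int
  | none, b => b
  | some a, none => some a
  | some a, some b => some (min a b)

def hotels2 (lst : List Int) : Int × List Int :=
  let n := lst.length
  let opt : List (Option Int) := List.replicate (n+1) none   -- [float("inf")] * (n+1)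
  let opt := opt.set 0 (some 0)                              -- opt[0] = 0
  let lst2 := 0 :: lst                                       -- lst.insert(0, 0)  (in-place in Python)
  let opt := (List.range' 1 n).foldl (fun opt i =>           -- for i in range(1, n+1): exact, bounds ≥ 0
    (List.range i).foldl (fun opt j =>                       -- for j in range(i)
      let diff := (opt.getD j none).map (fun v => (200 - (lst2.getD i 0 - lst2.getD j 0))^2 + v)
      opt.set i (optMin (opt.getD i none) diff)) opt) opt    -- opt[i] = min(opt[i], diff)
  ((opt.getD n none).getD 0, [])                             -- return opt[n], []

-- ===== PORT B =====
-- min(iterable) of a nonempty generator; the default 0 is unreachable (the range below is nonempty).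
def pyMinD (l : List Int) : Int := (PySem.List.min? l (fun v => v)).getD 0

def hotels2_alt (lst : List Int) : Int × List Int :=
  let stops := 0 :: lst                                      -- stops = [0] + lst
  let n := lst.length
  let togo : List Int := List.replicate (n+1) 0              -- togo = [0] * (n+1)
  let togo := ((List.range n).reverse).foldl (fun togo j =>  -- for j in reversed(range(n))
    togo.set j (pyMinD ((List.range' (j+1) (n-j)).map (fun i =>   -- min(... for i in range(j+1, n+1))
      (200 - (stops.getD i 0 - stops.getD j 0))^2 + togo.getD i 0)))) togo
  (togo.getD 0 0, [])                                        -- return togo[0], []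

-- ===== PRECONDITION & SPEC =====
def Spec_hotels2 (lst : List Int) (out : Int × List Int) : Prop := out = hotels2_alt lst
instance (lst : List Int) (out : Int × List Int) : Decidable (Spec_hotels2 lst out) := by unfold Spec_hotels2; infer_instance

-- ===== CLAIM (what is proved, stated in full; the proofs are below) =====
def Claim_equal_hotels2 : Prop := ∀ (lst : List Int), Dom_hotels2 lst → Spec_hotels2 lst (hotels2 lst)

-- ===== LEMMAS AND PROOFS =====

-- cost of driving from stop j to stop i (stop 0 is the start at position 0)
def pvC (lst : List Int) (j i : Nat) : Int := (200 - ((0 :: lst).getD i 0 - (0 :: lst).getD j 0))^2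

-- forward values: fList c i = [f 0, …, f i] where f i = min penalty to reach stop i from stop 0
def fList (c : Nat → Nat → Int) : Nat → List Int
  | 0 => [0]
  | i+1 => fList c i ++ [pyMinD ((List.range (i+1)).map (fun j => c j (i+1) + (fList c i).getD j 0))]

def fv (c : Nat → Nat → Int) (i : Nat) : Int := (fList c i).getD i 0

-- backward values: gList c n d = [g (n-d), …, g n] where g j = min penalty from stop j to stop n
def gList (c : Nat → Nat → Int) (n : Nat) : Nat → List Int
  | 0 => [0]
  | d+1 => pyMinD ((List.range (d+1)).map (fun t => c (n-(d+1)) (n-d+t) + (gList c n d).getD t 0)) :: gList c n d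

def gv (c : Nat → Nat → Int) (n d : Nat) : Int := (gList c n d).getD 0 0

theorem pyMinD_cons (x : Int) (t : List Int) : pyMinD (x :: t) = t.foldl min x := by
  simp [pyMinD, PySem.List.min?_id_cons]

theorem pyMinD_le {l : List Int} {y : Int} (hy : y ∈ l) : pyMinD l ≤ y := by
  cases l with
  | nil => cases hy
  | cons x t =>
    rw [pyMinD_cons]
    rcases List.mem_cons.mp hy with h | h
    · exact h ▸ (PySem.List.foldl_min_le t x).1
    · exact (PySem.List.foldl_min_le t x).2 y h

theorem pyMinD_mem {l : List Int} (h : l ≠ []) : pyMinD l ∈ l := by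
  cases l with
  | nil => exact absurd rfl h
  | cons x t =>
    rw [pyMinD_cons]
    rcases PySem.List.foldl_min_mem t x with h | h
    · rw [h]; exact List.mem_cons_self
    · exact List.mem_cons_of_mem x h

theorem getD_at_len {α : Type} (P : List α) (v : α) (R : List α) (d : α) :
    (P ++ v :: R).getD P.length d = v := by
  simp

theorem set_at_len {α : Type} (P : List α) (v w : α) (R : List α) :
    (P ++ v :: R).set P.length w = P ++ w :: R := by
  simp

theorem set_at_len' {α : Type} (P : List α) (v w : α) (R : List α) (k : Nat) (hk : P.length = k) :
    (P ++ v :: R).set k w = P ++ w :: R := by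
  subst hk; simp

theorem getD_map_some (l : List Int) (j : Nat) (h : j < l.length) :
    (l.map some).getD j none = some (l.getD j 0) := by
  simp [List.getD_eq_getElem?_getD, h]

theorem fList_length (c : Nat → Nat → Int) (i : Nat) : (fList c i).length = i + 1 := by
  induction i with
  | zero => rfl
  | succ i ih => simp [fList, ih]

theorem fList_getD (c : Nat → Nat → Int) (i j : Nat) (h : j ≤ i) :
    (fList c i).getD j 0 = fv c j := by
  induction i with
  | zero => interval_cases j; rfl
  | succ i ih =>
    rcases Nat.lt_or_ge j (i+1) with h' | h'
    · rw [fList, List.getD_append _ _ _ _ (by rw [fList_length]; omega)]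
      exact ih (by omega)
    · have : j = i + 1 := by omega
      subst this; rfl

theorem fList_succ (c : Nat → Nat → Int) (i : Nat) :
    fList c (i+1) = fList c i ++ [pyMinD ((List.range (i+1)).map (fun j => c j (i+1) + fv c j))] := by
  have hmap : (List.range (i+1)).map (fun j => c j (i+1) + (fList c i).getD j 0)
      = (List.range (i+1)).map (fun j => c j (i+1) + fv c j) :=
    List.map_congr_left (fun j hj => by
      rw [fList_getD c i j (Nat.lt_succ_iff.mp (List.mem_range.mp hj))])
  rw [fList, hmap]

theorem fv_succ (c : Nat → Nat → Int) (i : Nat) :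
    fv c (i+1) = pyMinD ((List.range (i+1)).map (fun j => c j (i+1) + fv c j)) := by
  have hL : (fList c i).length = i + 1 := fList_length c i
  show (fList c (i+1)).getD (i+1) 0 = _
  rw [fList_succ, List.getD_append_right _ _ _ _ (le_of_eq hL)]
  simp [hL]

theorem fv_le (c : Nat → Nat → Int) (i j : Nat) (h : j ≤ i) :
    fv c (i+1) ≤ c j (i+1) + fv c j := by
  rw [fv_succ]
  exact pyMinD_le (List.mem_map.mpr ⟨j, List.mem_range.mpr (by omega), rfl⟩)

theorem fv_attained (c : Nat → Nat → Int) (i : Nat) :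
    ∃ j ≤ i, fv c (i+1) = c j (i+1) + fv c j := by
  rw [fv_succ]
  have h := pyMinD_mem (l := (List.range (i+1)).map (fun j => c j (i+1) + fv c j)) (by simp)
  rcases List.mem_map.mp h with ⟨j, hj, hval⟩
  exact ⟨j, by have := List.mem_range.mp hj; omega, hval.symm⟩

theorem gList_succ (c : Nat → Nat → Int) (n d : Nat) :
    gList c n (d+1) = gv c n (d+1) :: gList c n d := rfl

theorem gList_getD (c : Nat → Nat → Int) (n d t : Nat) (h : t ≤ d) :
    (gList c n d).getD t 0 = gv c n (d - t) := by
  induction d generalizing t with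
  | zero => interval_cases t; rfl
  | succ d ih =>
    cases t with
    | zero => rfl
    | succ t =>
      rw [gList_succ]
      show (gList c n d).getD t 0 = gv c n (d + 1 - (t + 1))
      rw [ih t (by omega)]
      congr 1
      omega

theorem gv_zero (c : Nat → Nat → Int) (n : Nat) : gv c n 0 = 0 := rfl

theorem gv_succ (c : Nat → Nat → Int) (n d : Nat) :
    gv c n (d+1) = pyMinD ((List.range (d+1)).map (fun t => c (n-(d+1)) (n-d+t) + gv c n (d-t))) := by
  show pyMinD _ = _
  congr 1
  exact List.map_congr_left (fun t ht => by
    rw [gList_getD c n d t (Nat.lt_succ_iff.mp (List.mem_range.mp ht))])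

theorem gv_le (c : Nat → Nat → Int) (n d t : Nat) (h : t ≤ d) :
    gv c n (d+1) ≤ c (n-(d+1)) (n-d+t) + gv c n (d-t) := by
  rw [gv_succ]
  exact pyMinD_le (List.mem_map.mpr ⟨t, List.mem_range.mpr (by omega), rfl⟩)

theorem gv_attained (c : Nat → Nat → Int) (n d : Nat) :
    ∃ t ≤ d, gv c n (d+1) = c (n-(d+1)) (n-d+t) + gv c n (d-t) := by
  rw [gv_succ]
  have h := pyMinD_mem (l := (List.range (d+1)).map (fun t => c (n-(d+1)) (n-d+t) + gv c n (d-t))) (by simp)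
  rcases List.mem_map.mp h with ⟨t, ht, hval⟩
  exact ⟨t, by have := List.mem_range.mp ht; omega, hval.symm⟩

-- exchange argument, half 1: the forward optimum is ≤ any "prefix optimum + suffix optimum" split
theorem fv_le_split (c : Nat → Nat → Int) (n : Nat) :
    ∀ d, d ≤ n → fv c n ≤ fv c (n-d) + gv c n d := by
  intro d
  induction d using Nat.strong_induction_on with
  | _ d ih =>
    intro hd
    cases d with
    | zero => simp [gv_zero]
    | succ d =>
      rcases gv_attained c n d with ⟨t, ht, heq⟩
      have h1 : fv c n ≤ fv c (n-(d-t)) + gv c n (d-t) := ih (d-t) (by omega) (by omega)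
      have hni : n - (d - t) = (n-d+t-1) + 1 := by omega
      have hji : n - (d+1) ≤ n-d+t-1 := by omega
      have h2 : fv c (n-d+t) ≤ c (n-(d+1)) (n-d+t) + fv c (n-(d+1)) := by
        have := fv_le c (n-d+t-1) (n-(d+1)) hji
        have he : n-d+t-1+1 = n-d+t := by omega
        rwa [he] at this
      rw [hni] at h1
      have he : n-d+t-1+1 = n-d+t := by omega
      rw [he] at h1
      linarith

-- exchange argument, half 2: the backward optimum is ≤ any split as well
theorem gv_le_split (c : Nat → Nat → Int) (n : Nat) :
    ∀ i, i ≤ n → gv c n n ≤ fv c i + gv c n (n-i) := by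
  intro i
  induction i using Nat.strong_induction_on with
  | _ i ih =>
    intro hi
    cases i with
    | zero => simp [fv, fList]
    | succ i =>
      rcases fv_attained c i with ⟨j, hj, heq⟩
      have h1 : gv c n n ≤ fv c j + gv c n (n-j) := ih j (by omega) (by omega)
      have h2 : gv c n (n-j) ≤ c j (i+1) + gv c n (n-(i+1)) := by
        have := gv_le c n (n-j-1) (i-j) (by omega)
        have e1 : n-j-1+1 = n-j := by omega
        have e2 : n-(n-j) = j := by omega
        have e3 : n-(n-j-1)+(i-j) = i+1 := by omega
        have e4 : n-j-1-(i-j) = n-(i+1) := by omega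
        rwa [e1, e2, e3, e4] at this
      linarith

theorem fv_eq_gv (c : Nat → Nat → Int) (n : Nat) : fv c n = gv c n n := by
  have h1 := fv_le_split c n n le_rfl
  have h2 := gv_le_split c n n le_rfl
  simp [gv_zero] at h1 h2
  have hf0 : fv c 0 = 0 := rfl
  rw [hf0] at h1
  omega

-- ----- alignment of port A with fv -----

theorem foldl_optMin_some (e : Nat → Int) (js : List Nat) (x : Int) :
    js.foldl (fun acc j => optMin acc (some (e j))) (some x) = some ((js.map e).foldl min x) := by
  induction js generalizing x with
  | nil => rfl
  | cons j js ih =>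
    simp only [List.map_cons, List.foldl_cons]
    exact ih (min x (e j))

theorem foldl_optMin_none (e : Nat → Int) (j0 : Nat) (js : List Nat) :
    (j0 :: js).foldl (fun acc j => optMin acc (some (e j))) none
      = some (pyMinD ((j0 :: js).map e)) := by
  show js.foldl (fun acc j => optMin acc (some (e j))) (optMin none (some (e j0))) = _
  rw [show optMin none (some (e j0)) = some (e j0) from rfl, foldl_optMin_some,
    List.map_cons, pyMinD_cons]

theorem innerA (lst : List Int) (k : Nat) (js : List Nat) (hjs : ∀ j ∈ js, j < k + 1) (v : Option Int) :
    js.foldl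
      (fun opt j =>
        opt.set (k+1) (optMin (opt.getD (k+1) none)
          ((opt.getD j none).map (fun w => (200 - ((0 :: lst).getD (k+1) 0 - (0 :: lst).getD j 0)) ^ 2 + w))))
      ((fList (pvC lst) k).map some ++ v :: List.replicate (lst.length - (k+1)) none)
    = (fList (pvC lst) k).map some ++
        (js.foldl (fun acc j => optMin acc (some (pvC lst j (k+1) + fv (pvC lst) j))) v)
          :: List.replicate (lst.length - (k+1)) none := by
  induction js generalizing v with
  | nil => rfl
  | cons j js ih =>
    have hj : j < k + 1 := hjs j List.mem_cons_self
    have hP : ((fList (pvC lst) k).map some).length = k + 1 := by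
      simp [fList_length]
    have hgj : ((fList (pvC lst) k).map some ++ v :: List.replicate (lst.length - (k+1)) none).getD j none
        = some (fv (pvC lst) j) := by
      rw [List.getD_append _ _ _ _ (by omega)]
      rw [getD_map_some _ _ (by rw [fList_length]; omega)]
      rw [fList_getD _ _ _ (by omega)]
    have hgk : ((fList (pvC lst) k).map some ++ v :: List.replicate (lst.length - (k+1)) none).getD (k+1) none = v := by
      rw [← hP, getD_at_len]
    simp only [List.foldl_cons]
    rw [hgj, hgk]
    simp only [Option.map_some]
    rw [← hP, set_at_len, hP]
    exact ih (fun j hj => hjs j (List.mem_cons_of_mem _ hj)) _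

theorem outerA (lst : List Int) (k : Nat) (hk : k ≤ lst.length) :
    (List.range' 1 k).foldl
      (fun opt i => (List.range i).foldl
        (fun opt j => opt.set i (optMin (opt.getD i none)
           ((opt.getD j none).map (fun w => (200 - ((0 :: lst).getD i 0 - (0 :: lst).getD j 0)) ^ 2 + w)))) opt)
      ((List.replicate (lst.length + 1) (none : Option Int)).set 0 (some 0))
    = (fList (pvC lst) k).map some ++ List.replicate (lst.length - k) none := by
  induction k with
  | zero =>
    simp [fList, List.replicate_succ]
  | succ k ih =>
    have hk' : k ≤ lst.length := by omega
    rw [show List.range' 1 (k+1) = List.range' 1 k ++ [1 + 1 * k] from List.range'_concat,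
        List.foldl_append, ih hk']
    simp only [List.foldl_cons, List.foldl_nil, Nat.one_mul]
    have h1k : 1 + k = k + 1 := by omega
    rw [h1k]
    have hsplit : List.replicate (lst.length - k) (none : Option Int)
        = none :: List.replicate (lst.length - (k+1)) none := by
      have : lst.length - k = (lst.length - (k+1)) + 1 := by omega
      rw [this, List.replicate_succ]
    rw [hsplit, innerA lst k (List.range (k+1)) (fun j hj => List.mem_range.mp hj) none]
    rw [show List.range (k+1) = 0 :: (List.range k).map Nat.succ from List.range_succ_eq_map]
    rw [foldl_optMin_none]
    rw [show (0 :: (List.range k).map Nat.succ) = List.range (k+1) from List.range_succ_eq_map.symm]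
    rw [← fv_succ (pvC lst) k]
    rw [fList_succ (pvC lst) k]
    simp [fv_succ]

theorem alignA (lst : List Int) : hotels2 lst = (fv (pvC lst) lst.length, []) := by
  have h := outerA lst lst.length le_rfl
  simp only [Nat.sub_self, List.replicate_zero, List.append_nil] at h
  show ((((List.range' 1 lst.length).foldl
      (fun opt i => (List.range i).foldl
        (fun opt j => opt.set i (optMin (opt.getD i none)
           ((opt.getD j none).map (fun w => (200 - ((0 :: lst).getD i 0 - (0 :: lst).getD j 0)) ^ 2 + w)))) opt)
      ((List.replicate (lst.length + 1) (none : Option Int)).set 0 (some 0))).getD lst.length none).getD 0, ([] : List Int)) = _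
  rw [h, getD_map_some _ _ (by rw [fList_length]; omega)]
  rw [fList_getD _ _ _ le_rfl]
  rfl

-- ----- alignment of port B with gv -----

theorem outerB (lst : List Int) (m : Nat) (hm : m ≤ lst.length) :
    ((List.range m).reverse).foldl
      (fun togo j => togo.set j (pyMinD ((List.range' (j+1) (lst.length - j)).map (fun i =>
        (200 - ((0 :: lst).getD i 0 - (0 :: lst).getD j 0)) ^ 2 + togo.getD i 0))))
      (List.replicate m 0 ++ gList (pvC lst) lst.length (lst.length - m))
    = gList (pvC lst) lst.length lst.length := by
  induction m with
  | zero => simp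
  | succ m ih =>
    have hm' : m ≤ lst.length := by omega
    rw [show (List.range (m+1)).reverse = m :: (List.range m).reverse by
      rw [List.range_succ]; simp]
    rw [List.foldl_cons]
    have hstep :
        (List.replicate (m+1) (0:Int) ++ gList (pvC lst) lst.length (lst.length - (m+1))).set m
          (pyMinD ((List.range' (m+1) (lst.length - m)).map (fun i =>
            (200 - ((0 :: lst).getD i 0 - (0 :: lst).getD m 0)) ^ 2 +
              (List.replicate (m+1) (0:Int) ++ gList (pvC lst) lst.length (lst.length - (m+1))).getD i 0)))
        = List.replicate m 0 ++ gList (pvC lst) lst.length (lst.length - m) := by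
      have hcand : (List.range' (m+1) (lst.length - m)).map (fun i =>
            (200 - ((0 :: lst).getD i 0 - (0 :: lst).getD m 0)) ^ 2 +
              (List.replicate (m+1) (0:Int) ++ gList (pvC lst) lst.length (lst.length - (m+1))).getD i 0)
          = (List.range (lst.length - m)).map (fun t =>
              pvC lst m (m+1+t) + gv (pvC lst) lst.length (lst.length - (m+1) - t)) := by
        rw [List.range'_eq_map_range, List.map_map]
        refine List.map_congr_left (fun t ht => ?_)
        have ht' : t < lst.length - m := List.mem_range.mp ht
        have hget : (List.replicate (m+1) (0:Int) ++ gList (pvC lst) lst.length (lst.length - (m+1))).getD (m+1+t) 0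
            = gv (pvC lst) lst.length (lst.length - (m+1) - t) := by
          rw [List.getD_append_right _ _ _ _ (by simp only [List.length_replicate]; omega)]
          rw [show m+1+t - (List.replicate (m+1) (0:Int)).length = t by simp]
          exact gList_getD _ _ _ _ (by omega)
        simp only [Function.comp]
        rw [hget]
        rfl
      rw [hcand]
      have hgv : gv (pvC lst) lst.length (lst.length - m)
          = pyMinD ((List.range (lst.length - m)).map (fun t =>
              pvC lst m (m+1+t) + gv (pvC lst) lst.length (lst.length - (m+1) - t))) := by
        have hd : lst.length - m = (lst.length - (m+1)) + 1 := by omega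
        rw [hd, gv_succ]
        congr 1
        refine List.map_congr_left (fun t ht => ?_)
        have e2 : lst.length - (lst.length - (m+1) + 1) = m := by omega
        have e3 : lst.length - (lst.length - (m+1)) + t = m+1+t := by omega
        rw [e2, e3]
      rw [← hgv]
      rw [List.replicate_succ']
      rw [List.append_assoc, List.singleton_append, set_at_len' _ _ _ _ m (by simp)]
      congr 1
      have hd : lst.length - m = (lst.length - (m+1)) + 1 := by omega
      rw [hd, gList_succ, ← hd]
    rw [hstep]
    exact ih hm'

theorem alignB (lst : List Int) : hotels2_alt lst = (gv (pvC lst) lst.length lst.length, []) := by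
  have h0 : List.replicate (lst.length + 1) (0:Int)
      = List.replicate lst.length 0 ++ gList (pvC lst) lst.length (lst.length - lst.length) := by
    rw [Nat.sub_self]
    show _ = List.replicate lst.length (0:Int) ++ [0]
    exact List.replicate_succ'
  have h := outerB lst lst.length le_rfl
  show ((((List.range lst.length).reverse).foldl
      (fun togo j => togo.set j (pyMinD ((List.range' (j+1) (lst.length - j)).map (fun i =>
        (200 - ((0 :: lst).getD i 0 - (0 :: lst).getD j 0)) ^ 2 + togo.getD i 0))))
      (List.replicate (lst.length + 1) 0)).getD 0 0, ([] : List Int)) = _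
  rw [h0, h]
  rfl

-- ===== VERDICT (by name: the statement is the Claim_ definition above) =====
theorem hotels2_spec : Claim_equal_hotels2 := by
  intro lst _
  unfold Spec_hotels2
  rw [alignA lst, alignB lst, fv_eq_gv]
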